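-- pv_equiv track=rewrite | github.com/kaustubh-pandey/Auction-Algorithm | auction.py | find
-- ===== SOURCE A (Python) =====
-- def cmp(a,b):
-- 	if(a[0]<b[0]):
-- 		return True
-- 	elif(a[0]==b[0] and a[1]<b[1]):
-- 		return True
-- 	return False
--
-- def find(profit,pair,person):
-- 	largest=[-999999,0]
-- 	slargest=[-999999,0]
-- 	for i in range(len(profit[0])):
-- 		val = [profit[person][i]-pair[i],i]
-- 		if(cmp(largest,val)):
-- 			slargest=largest
-- 			largest = val
-- 		elif(cmp(slargest,val)):
-- 			slargest = val
-- 	return [largest,slargest]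
-- ===== SOURCE B (Python) =====
-- def find(profit, pair, person):
--     candidates = [[-999999, 0], [-999999, 0]]
--     candidates += [[profit[person][i] - pair[i], i] for i in range(len(profit[0]))]
--     return sorted(candidates, reverse=True)[:2]
-- ===== Notes on version B (the rewrite author's own statement) =====
-- stated objective: simpler
-- what changed: Replaces the manual top-2 tracking loop with its hand-written cmp helper by building the candidate list (with the two -999999 sentinels in front) and returning the first two elements of a descending sort.
import Mathlib
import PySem

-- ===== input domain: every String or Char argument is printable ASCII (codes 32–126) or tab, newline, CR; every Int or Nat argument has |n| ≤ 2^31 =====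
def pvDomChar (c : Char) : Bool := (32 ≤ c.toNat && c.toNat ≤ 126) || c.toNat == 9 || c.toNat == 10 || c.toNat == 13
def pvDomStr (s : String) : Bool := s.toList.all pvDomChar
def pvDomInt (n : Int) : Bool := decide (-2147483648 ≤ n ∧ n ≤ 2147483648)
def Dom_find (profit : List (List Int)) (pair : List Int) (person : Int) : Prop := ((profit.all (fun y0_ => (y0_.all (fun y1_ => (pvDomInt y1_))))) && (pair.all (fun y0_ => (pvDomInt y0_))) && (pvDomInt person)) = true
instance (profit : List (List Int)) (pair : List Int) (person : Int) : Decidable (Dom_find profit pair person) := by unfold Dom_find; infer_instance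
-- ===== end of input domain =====

-- B replaces A's manual top-2 tracking loop (with its hand-written cmp) by sorting the
-- sentinel-seeded candidate list descending and taking the first two elements (simpler, not faster).


-- ===== PORT A =====
-- cmp from Source A; within `find` both arguments are always the length-2 lists it builds,
-- so the pyGetD defaults are never reached (Python would raise only on shorter lists).
def pvCmp (a b : List Int) : Bool :=
  if PySem.List.pyGetD a 0 0 < PySem.List.pyGetD b 0 0 then true
  else if PySem.List.pyGetD a 0 0 == PySem.List.pyGetD b 0 0 && PySem.List.pyGetD a 1 0 < PySem.List.pyGetD b 1 0 then true
  else false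

def find (profit : List (List Int)) (pair : List Int) (person : Int) : List (List Int) :=
  let st := (PySem.List.pyRange 0 ((PySem.List.pyGetD profit 0 []).length : Int) 1).foldl
    (fun (st : List Int × List Int) i =>
      let val : List Int :=
        [PySem.List.pyGetD (PySem.List.pyGetD profit person []) i 0 - PySem.List.pyGetD pair i 0, i]
      if pvCmp st.1 val then (val, st.1)
      else if pvCmp st.2 val then (st.1, val)
      else st)
    ([-999999, 0], [-999999, 0])
  [st.1, st.2]

-- ===== PORT B =====
def find_alt (profit : List (List Int)) (pair : List Int) (person : Int) : List (List Int) :=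
  let candidates : List (List Int) :=
    [[-999999, 0], [-999999, 0]] ++
      (PySem.List.pyRange 0 ((PySem.List.pyGetD profit 0 []).length : Int) 1).map
        (fun i => [PySem.List.pyGetD (PySem.List.pyGetD profit person []) i 0 - PySem.List.pyGetD pair i 0, i])
  (PySem.List.sorted candidates (fun x => x) true).take 2

-- ===== PRECONDITION & SPEC =====
-- Pre_ excludes exactly the inputs where Python A raises IndexError: empty profit, or
-- (when profit[0] is nonempty) person out of (negative-wrapping) range, or the selected
-- row or pair shorter than profit[0].
def Pre_find (profit : List (List Int)) (pair : List Int) (person : Int) : Prop :=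
  profit ≠ [] ∧
  ((PySem.List.pyGetD profit 0 []).length = 0 ∨
    (PySem.Raise.InRange profit.length person ∧
     (PySem.List.pyGetD profit 0 []).length ≤ (PySem.List.pyGetD profit person []).length ∧
     (PySem.List.pyGetD profit 0 []).length ≤ pair.length))

instance (profit : List (List Int)) (pair : List Int) (person : Int) : Decidable (Pre_find profit pair person) := by
  unfold Pre_find PySem.Raise.InRange; infer_instance

def pvWitness_find : List (List Int) × List Int × Int := ([[1, 2], [3, 4]], [0, 1], 1)

def Spec_find (profit : List (List Int)) (pair : List Int) (person : Int) (out : List (List Int)) : Prop := out = find_alt profit pair person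
instance (profit : List (List Int)) (pair : List Int) (person : Int) (out : List (List Int)) : Decidable (Spec_find profit pair person out) := by unfold Spec_find; infer_instance

-- ===== CLAIM (what is proved, stated in full; the proofs are below) =====
def Claim_equal_find : Prop := ∀ (profit : List (List Int)) (pair : List Int) (person : Int), Dom_find profit pair person → Pre_find profit pair person → Spec_find profit pair person (find profit pair person)

-- ===== LEMMAS AND PROOFS =====

-- The lexicographic step B's insertion sort performs, restricted to the first two slots.
def pvStepL (st : List Int × List Int) (v : List Int) : List Int × List Int :=
  if st.1 < v then (v, st.1) else if st.2 < v then (st.1, v) else st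

-- cmp on length-2 lists is exactly lexicographic < on List Int.
lemma pvCmp_eq_lt (x i y j : Int) :
    pvCmp [x, i] [y, j] = decide (([x, i] : List Int) < [y, j]) := by
  simp only [pvCmp, PySem.List.pyGetD]
  norm_num [List.cons_lt_cons_iff]

-- A's cmp-driven fold equals the lexicographic fold when every value in play is a length-2 list.
lemma pvFold_cmp_eq (f : Int → List Int) (hf : ∀ t, ∃ a b, f t = [a, b]) :
    ∀ (is_ : List Int) (x i y j : Int),
      is_.foldl (fun st t => if pvCmp st.1 (f t) then (f t, st.1)
                             else if pvCmp st.2 (f t) then (st.1, f t) else st) ([x, i], [y, j])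
      = is_.foldl (fun st t => pvStepL st (f t)) ([x, i], [y, j]) := by
  intro is_
  induction is_ with
  | nil => intro x i y j; rfl
  | cons t ts ih =>
    intro x i y j
    obtain ⟨a, b, hab⟩ := hf t
    simp only [List.foldl_cons, hab]
    by_cases h1 : ([x, i] : List Int) < [a, b]
    · have e1 : pvCmp [x, i] [a, b] = true := by rw [pvCmp_eq_lt]; simp [h1]
      simp only [e1, pvStepL, if_pos h1, if_true]
      exact ih a b x i
    · have e1 : pvCmp [x, i] [a, b] = false := by rw [pvCmp_eq_lt]; simp [h1]
      by_cases h2 : ([y, j] : List Int) < [a, b]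
      · have e2 : pvCmp [y, j] [a, b] = true := by rw [pvCmp_eq_lt]; simp [h2]
        simp only [e1, e2, pvStepL, if_neg h1, if_pos h2, if_true, Bool.false_eq_true, if_false]
        exact ih x i a b
      · have e2 : pvCmp [y, j] [a, b] = false := by rw [pvCmp_eq_lt]; simp [h2]
        simp only [e1, e2, pvStepL, if_neg h1, if_neg h2, Bool.false_eq_true, if_false]
        exact ih x i y j

-- Folding insertBy over any start list with ≥ 2 elements keeps the first two slots
-- exactly in step with pvStepL (both only ever look at the first two positions).
lemma pvFold_insert_shape :
    ∀ (cs : List (List Int)) (d0 d1 : List Int) (rest : List (List Int)),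
      ∃ rest',
        cs.foldl (fun acc v => PySem.List.insertBy
            (fun a b : List Int => decide (b < a)) v acc) (d0 :: d1 :: rest)
        = (cs.foldl pvStepL (d0, d1)).1 :: (cs.foldl pvStepL (d0, d1)).2 :: rest' := by
  intro cs
  induction cs with
  | nil => intro d0 d1 rest; exact ⟨rest, rfl⟩
  | cons v vs ih =>
    intro d0 d1 rest
    simp only [List.foldl_cons]
    by_cases h0 : d0 < v
    · have : PySem.List.insertBy (fun a b : List Int => decide (b < a)) v (d0 :: d1 :: rest)
          = v :: d0 :: d1 :: rest := by simp [PySem.List.insertBy, h0]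
      rw [this]
      have hst : pvStepL (d0, d1) v = (v, d0) := by simp [pvStepL, h0]
      rw [hst]; exact ih v d0 (d1 :: rest)
    · by_cases h1 : d1 < v
      · have : PySem.List.insertBy (fun a b : List Int => decide (b < a)) v (d0 :: d1 :: rest)
            = d0 :: v :: d1 :: rest := by simp [PySem.List.insertBy, h0, h1]
        rw [this]
        have hst : pvStepL (d0, d1) v = (d0, v) := by simp [pvStepL, h0, h1]
        rw [hst]; exact ih d0 v (d1 :: rest)
      · have : PySem.List.insertBy (fun a b : List Int => decide (b < a)) v (d0 :: d1 :: rest)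
            = d0 :: d1 :: PySem.List.insertBy (fun a b : List Int => decide (b < a)) v rest := by
          simp [PySem.List.insertBy, h0, h1]
        rw [this]
        have hst : pvStepL (d0, d1) v = (d0, d1) := by simp [pvStepL, h0, h1]
        rw [hst]; exact ih d0 d1 _

-- ===== VERDICT (by name: the statement is the Claim_ definition above) =====
theorem find_spec : Claim_equal_find := by
  intro profit pair person _ _
  simp only [Spec_find, find, find_alt]
  set f : Int → List Int := fun i =>
    [PySem.List.pyGetD (PySem.List.pyGetD profit person []) i 0 - PySem.List.pyGetD pair i 0, i]
    with hf
  have hshape : ∀ t, ∃ a b, f t = [a, b] := fun t => ⟨_, t, rfl⟩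
  set is_ := PySem.List.pyRange 0 ((PySem.List.pyGetD profit 0 []).length : Int) 1 with his
  -- Left side: replace cmp with the lexicographic step
  rw [pvFold_cmp_eq f hshape is_ (-999999) 0 (-999999) 0]
  -- Right side: sorted as a fold of insertBy, with the two sentinels as start state
  rw [PySem.List.sorted_rev_eq_foldl_insertBy]
  have hinit : ([[-999999, 0], [-999999, 0]] ++ is_.map f).foldl
      (fun acc v => PySem.List.insertBy (fun a b : List Int => decide (b < a)) v acc) []
      = (is_.map f).foldl
        (fun acc v => PySem.List.insertBy (fun a b : List Int => decide (b < a)) v acc)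
        ([-999999, 0] :: [-999999, 0] :: []) := by
    simp [PySem.List.insertBy]
  rw [hinit]
  obtain ⟨rest', hr⟩ := pvFold_insert_shape (is_.map f) [-999999, 0] [-999999, 0] []
  rw [hr, List.foldl_map]
  rfl
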